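-- pv_equiv track=rewrite | github.com/Pev40/seguridad-lab | amsco/amsco.py | ordenar_clave
-- ===== SOURCE A (Python) =====
-- def ordenar_clave(clave):
--     clave = clave.upper()
--     letras = list(clave)
--     orden = sorted(list(set(letras)))
--     asignaciones = {}
--     contador = 1
--     for letra in orden:
--         asignaciones[letra] = contador
--         contador += 1
--
--     orden_columnas = []
--     for letra in letras:
--         orden_columnas.append(asignaciones[letra])
--
--     return orden_columnas
-- ===== SOURCE B (Python) =====
-- def ordenar_clave(clave):
--     clave = clave.upper()
--     unique = set(clave)
--     return [1 + sum(1 for u in unique if u < letra) for letra in clave]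
-- ===== Notes on version B (the rewrite author's own statement) =====
-- stated objective: simpler
-- what changed: Replaces the sort-then-enumerate-then-dict-lookup pipeline by a direct per-letter rank computation: each letter's column number is 1 plus the count of distinct letters strictly smaller than it, so no sorted list and no mapping dict are built.
import Mathlib
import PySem

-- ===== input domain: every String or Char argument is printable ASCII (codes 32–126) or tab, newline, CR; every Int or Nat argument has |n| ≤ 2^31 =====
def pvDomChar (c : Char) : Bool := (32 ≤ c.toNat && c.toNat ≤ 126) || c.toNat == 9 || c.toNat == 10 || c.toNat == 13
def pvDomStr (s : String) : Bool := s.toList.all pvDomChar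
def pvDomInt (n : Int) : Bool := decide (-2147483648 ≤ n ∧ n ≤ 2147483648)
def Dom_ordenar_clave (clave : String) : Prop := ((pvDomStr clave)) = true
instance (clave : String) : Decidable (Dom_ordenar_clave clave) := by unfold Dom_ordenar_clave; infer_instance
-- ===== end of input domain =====

-- B computes each letter's rank directly (1 + number of strictly smaller distinct letters)
-- instead of A's sorted-unique list + enumeration dict; objective: simpler.

-- ===== PORT A =====
def ordenar_clave (clave : String) : List Int :=
  let letras := (PySem.Str.upper clave).toList
  let orden := PySem.List.sorted (PySem.Set.ofList letras) (fun x => x) false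
  let st := orden.foldl
    (fun (st : PySem.Dict Char Int × Int) letra => (st.1.insert letra st.2, st.2 + 1))
    (PySem.Dict.empty, 1)
  letras.foldl (fun acc letra => acc ++ [st.1.getD letra 0]) []

-- ===== PORT B =====
def ordenar_clave_alt (clave : String) : List Int :=
  let up := (PySem.Str.upper clave).toList
  let unique : PySem.Set Char := PySem.Set.ofList up
  up.map (fun letra =>
    1 + unique.foldl (fun a u => if u < letra then a + 1 else a) (0 : Int))

-- ===== PRECONDITION & SPEC =====
def Spec_ordenar_clave (clave : String) (out : List Int) : Prop := out = ordenar_clave_alt clave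
instance (clave : String) (out : List Int) : Decidable (Spec_ordenar_clave clave out) := by unfold Spec_ordenar_clave; infer_instance

-- ===== CLAIM (what is proved, stated in full; the proofs are below) =====
def Claim_equal_ordenar_clave : Prop := ∀ (clave : String), Dom_ordenar_clave clave → Spec_ordenar_clave clave (ordenar_clave clave)

-- ===== LEMMAS AND PROOFS =====

-- A's output-building loop is a map
theorem foldl_append_map (f : Char → Int) (l : List Char) (acc : List Int) :
    l.foldl (fun acc x => acc ++ [f x]) acc = acc ++ l.map f := by
  induction l generalizing acc with
  | nil => simp
  | cons x t ih => simp [List.foldl, ih]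

-- the dict built by A's enumeration loop, as a standalone recursion
def buildDict : List Char → PySem.Dict Char Int × Int → PySem.Dict Char Int × Int
  | [], st => st
  | x :: t, st => buildDict t (st.1.insert x st.2, st.2 + 1)

theorem buildDict_eq_foldl (l : List Char) (st : PySem.Dict Char Int × Int) :
    l.foldl (fun (st : PySem.Dict Char Int × Int) letra => (st.1.insert letra st.2, st.2 + 1)) st
      = buildDict l st := by
  induction l generalizing st with
  | nil => rfl
  | cons x t ih => simp [List.foldl, buildDict, ih]

theorem getD_buildDict_of_not_mem (t : List Char) (st : PySem.Dict Char Int × Int)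
    (c : Char) (h : c ∉ t) : (buildDict t st).1.getD c 0 = st.1.getD c 0 := by
  induction t generalizing st with
  | nil => rfl
  | cons x r ih =>
    simp only [List.mem_cons, not_or] at h
    rw [buildDict, ih _ h.2, PySem.Dict.getD_insert, if_neg h.1]

theorem getD_buildDict (s : List Char) (hs : s.Pairwise (· < ·)) (c : Char) (hc : c ∈ s)
    (d : PySem.Dict Char Int) (k : Int) :
    (buildDict s (d, k)).1.getD c 0 = k + (s.countP (fun u => decide (u < c)) : Int) := by
  induction s generalizing d k with
  | nil => cases hc
  | cons x t ih =>
    rw [List.pairwise_cons] at hs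
    rcases List.mem_cons.mp hc with rfl | hct
    · have hnot : c ∉ t := fun h => lt_irrefl c (hs.1 c h)
      rw [buildDict, getD_buildDict_of_not_mem _ _ _ hnot, PySem.Dict.getD_insert, if_pos rfl]
      have h0 : t.countP (fun u => decide (u < c)) = 0 := by
        rw [List.countP_eq_zero]
        intro u hu
        simpa using not_lt_of_gt (hs.1 u hu)
      simp [List.countP_cons, h0]
    · rw [buildDict, ih hs.2 hct]
      have hxc : x < c := hs.1 c hct
      simp [List.countP_cons, hxc]
      ring

theorem foldl_if_count (l : List Char) (c : Char) (a : Int) :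
    l.foldl (fun a u => if u < c then a + 1 else a) a
      = a + (l.countP (fun u => decide (u < c)) : Int) := by
  induction l generalizing a with
  | nil => simp
  | cons x t ih =>
    by_cases h : x < c <;> simp [List.foldl, h, ih, List.countP_cons] <;> ring

-- ===== VERDICT (by name: the statement is the Claim_ definition above) =====
theorem ordenar_clave_spec : Claim_equal_ordenar_clave := by
  intro clave _
  unfold Spec_ordenar_clave ordenar_clave ordenar_clave_alt
  simp only []
  set letras := (PySem.Str.upper clave).toList with hl
  rw [foldl_append_map, List.nil_append, buildDict_eq_foldl]
  apply List.map_congr_left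
  intro c hc
  have hperm : (PySem.List.sorted (PySem.Set.ofList letras) (fun x => x) false).Perm
      (PySem.Set.ofList letras) := PySem.List.sorted_perm _ _ _
  have hpw := PySem.List.sorted_ofList_pairwise_lt (xs := letras)
  have hmem : c ∈ PySem.List.sorted (PySem.Set.ofList letras) (fun x => x) false := by
    rw [PySem.List.mem_sorted]
    exact (PySem.Set.mem_ofList _ _).mpr hc
  rw [getD_buildDict _ hpw c hmem, foldl_if_count, hperm.countP_eq]
  ring
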